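-- pv_equiv track=rewrite | github.com/kts1890/feature-squeezing | code.py | exp_edge
-- ===== SOURCE A (Python) =====
-- def exp_edge(X_test, data):
--     edge = []
--     for i in range(len(data)):
--         temp = 0
--         for j in X_test[data[i]]:
--             for k in range(len(j)):
--                 if k != 0 and j[k-1]*j[k]==0 and (j[k]+j[k-1])!=0:
--                     temp += 1
--         edge.append(temp)
--     return edge
-- ===== SOURCE B (Python) =====
-- def exp_edge(X_test, data):
--     # Run-based counting: a row's number of zero/nonzero boundaries equals
--     # (number of maximal constant-zeroness runs) - 1, clamped at 0 for empty rows.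
--     def runs(row):
--         n = 0
--         i = 0
--         L = len(row)
--         while i < L:
--             z = (row[i] == 0)
--             while i < L and (row[i] == 0) == z:
--                 i += 1
--             n += 1
--         return n
--     return [sum(max(0, runs(row) - 1) for row in X_test[d]) for d in data]
-- ===== Notes on version B (the rewrite author's own statement) =====
-- stated objective: alternative
-- what changed: B never tests adjacent pairs: it counts the maximal runs of constant zeroness in each row (an outer loop that skips a whole run per iteration) and takes max(0, runs-1) per row, instead of A's per-index product/sum test on each adjacent pair.
import Mathlib
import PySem

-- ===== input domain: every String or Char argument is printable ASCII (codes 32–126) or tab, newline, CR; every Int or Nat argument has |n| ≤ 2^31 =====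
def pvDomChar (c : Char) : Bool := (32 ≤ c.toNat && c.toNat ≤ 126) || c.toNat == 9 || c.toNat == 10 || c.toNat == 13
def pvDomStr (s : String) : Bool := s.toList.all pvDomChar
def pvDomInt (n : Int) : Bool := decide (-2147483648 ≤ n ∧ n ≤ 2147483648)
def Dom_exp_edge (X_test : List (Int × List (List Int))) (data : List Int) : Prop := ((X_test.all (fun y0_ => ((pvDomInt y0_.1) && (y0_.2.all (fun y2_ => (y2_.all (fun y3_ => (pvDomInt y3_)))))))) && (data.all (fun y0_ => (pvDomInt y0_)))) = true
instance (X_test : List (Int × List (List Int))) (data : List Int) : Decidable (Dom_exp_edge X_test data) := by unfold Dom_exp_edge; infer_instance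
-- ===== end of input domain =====

-- B counts maximal runs of constant zeroness per row (max(0, runs-1) boundaries),
-- instead of A's per-index product/sum test on adjacent pairs (objective: alternative).

-- ===== PORT A =====
def exp_edge (X_test : List (Int × List (List Int))) (data : List Int) : List Int :=
  (PySem.List.pyRange 0 (data.length : Int) 1).foldl (fun edge i =>
    let rows := (X_test.lookup (PySem.List.pyGetD data i 0)).getD []
    let temp : Int := rows.foldl (fun temp j =>
      (PySem.List.pyRange 0 (j.length : Int) 1).foldl (fun temp k =>
        if k ≠ 0 ∧ PySem.List.pyGetD j (k-1) 0 * PySem.List.pyGetD j k 0 = 0 ∧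
           PySem.List.pyGetD j k 0 + PySem.List.pyGetD j (k-1) 0 ≠ 0
        then temp + 1 else temp) temp) 0
    edge ++ [temp]) []

-- ===== PORT B =====
-- B's while loop: each outer iteration skips one maximal run of constant zeroness
def pvRuns : List Int → Int
  | [] => 0
  | a :: t => 1 + pvRuns (t.dropWhile (fun v => ((v == 0) == (a == 0))))
termination_by l => l.length
decreasing_by
  exact Nat.lt_succ_of_le (List.length_dropWhile_le _ _)

def exp_edge_alt (X_test : List (Int × List (List Int))) (data : List Int) : List Int :=
  data.map (fun d =>
    (((X_test.lookup d).getD []).map (fun row => max 0 (pvRuns row - 1))).sum)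

-- ===== PRECONDITION & SPEC =====
-- Pre_ excludes exactly the inputs where some element of data is not a key of the dict
-- X_test: there Python A raises KeyError (and B raises too).
def Pre_exp_edge (X_test : List (Int × List (List Int))) (data : List Int) : Prop :=
  ∀ d ∈ data, d ∈ X_test.map Prod.fst
instance (X_test : List (Int × List (List Int))) (data : List Int) : Decidable (Pre_exp_edge X_test data) := by unfold Pre_exp_edge; infer_instance

def pvWitness_exp_edge : (List (Int × List (List Int))) × List Int :=
  ([(0, [[0, 1, 0], [2, 2]]), (1, [[]])], [0, 1, 0])

def Spec_exp_edge (X_test : List (Int × List (List Int))) (data : List Int) (out : List Int) : Prop := out = exp_edge_alt X_test data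
instance (X_test : List (Int × List (List Int))) (data : List Int) (out : List Int) : Decidable (Spec_exp_edge X_test data out) := by unfold Spec_exp_edge; infer_instance

-- ===== CLAIM (what is proved, stated in full; the proofs are below) =====
def Claim_equal_exp_edge : Prop := ∀ (X_test : List (Int × List (List Int))) (data : List Int), Dom_exp_edge X_test data → Pre_exp_edge X_test data → Spec_exp_edge X_test data (exp_edge X_test data)

-- ===== LEMMAS AND PROOFS =====

-- proof-side helper: number of adjacent flag changes in a row
def pvTrans (row : List Int) : Int :=
  ((row.zip row.tail).countP (fun p => (p.1 == 0) != (p.2 == 0)) : Int)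

-- runs of a nonempty row = 1 + number of adjacent flag changes
lemma pvRuns_eq_trans (t : List Int) (a : Int) :
    pvRuns (a :: t) = 1 + pvTrans (a :: t) := by
  induction t generalizing a with
  | nil => simp [pvRuns, pvTrans]
  | cons b t ih =>
    by_cases h : (b == 0) = (a == 0)
    · have hdw : (b :: t).dropWhile (fun v => ((v == 0) == (a == 0)))
          = t.dropWhile (fun v => ((v == 0) == (b == 0))) := by
        rw [List.dropWhile_cons]
        simp [h]
      have hb : pvRuns (b :: t) = 1 + pvRuns (t.dropWhile (fun v => ((v == 0) == (b == 0)))) := by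
        rw [pvRuns]
      rw [pvRuns, hdw, ← hb, ih b]
      simp [pvTrans, h]
    · have hdw : (b :: t).dropWhile (fun v => ((v == 0) == (a == 0))) = b :: t := by
        rw [List.dropWhile_cons]
        simp [h]
      rw [pvRuns, hdw, ih b]
      have hne : ((a == 0) != (b == 0)) = true := by
        cases hb : (b == 0) <;> cases ha : (a == 0) <;> simp_all
      simp [pvTrans, hne]
      ring

lemma pvMax_runs (j : List Int) : max 0 (pvRuns j - 1) = pvTrans j := by
  cases j with
  | nil => simp [pvRuns, pvTrans]
  | cons a t =>
    rw [pvRuns_eq_trans]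
    have h : (0 : Int) ≤ pvTrans (a :: t) := by
      unfold pvTrans; positivity
    omega

-- counting indexed adjacent flag changes equals counting over the zipped pairs
lemma pv_aux (t : List Int) (a : Int) :
    (List.range t.length).countP
      (fun k => ((a :: t).getD k 0 == 0) != (t.getD k 0 == 0))
    = ((a :: t).zip t).countP (fun p => (p.1 == 0) != (p.2 == 0)) := by
  induction t generalizing a with
  | nil => rfl
  | cons b t ih =>
    simp only [List.length_cons, List.range_succ_eq_map, List.countP_cons, List.countP_map,
      List.zip_cons_cons, List.getD_cons_zero, List.getD_cons_succ, Function.comp_def]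
    rw [ih b]

-- one row: A's index-loop count equals the adjacent-flag-change count
lemma pv_row (j : List Int) :
    ((PySem.List.pyRange 0 (j.length : Int) 1).countP
      (fun k => decide (k ≠ 0 ∧ PySem.List.pyGetD j (k-1) 0 * PySem.List.pyGetD j k 0 = 0 ∧
                        PySem.List.pyGetD j k 0 + PySem.List.pyGetD j (k-1) 0 ≠ 0)) : Int)
    = pvTrans j := by
  rw [pvTrans]
  rw [PySem.List.pyRange_zero_natCast, List.countP_map]
  simp only [Function.comp_def]
  congr 1
  cases j with
  | nil => rfl
  | cons a t =>
    have hcongr : ∀ k ∈ List.range (a :: t).length,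
        (decide ((k : Int) ≠ 0 ∧
            PySem.List.pyGetD (a :: t) ((k : Int) - 1) 0 * PySem.List.pyGetD (a :: t) (k : Int) 0 = 0 ∧
            PySem.List.pyGetD (a :: t) (k : Int) 0 + PySem.List.pyGetD (a :: t) ((k : Int) - 1) 0 ≠ 0)) = true
        ↔ (decide (k ≠ 0) && (((a :: t).getD (k-1) 0 == 0) != ((a :: t).getD k 0 == 0))) = true := by
      intro k _
      cases k with
      | zero => simp
      | succ n =>
        have e1 : ((n + 1 : Nat) : Int) - 1 = ((n : Nat) : Int) := by push_cast; ring
        simp only [e1, PySem.List.pyGetD_natCast, List.getD_cons_succ]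
        simp [mul_eq_zero]
        omega
    rw [List.countP_congr hcongr]
    rw [List.length_cons, List.range_succ_eq_map, List.countP_cons, List.countP_map]
    have hsucc : ∀ x : Nat, decide (x.succ ≠ 0) = true := fun x => by simp
    have hz : (decide ((0:Nat) ≠ 0)) = false := by simp
    simp only [Function.comp_def, hsucc, hz, Bool.true_and, Bool.false_and,
      List.getD_cons_succ, Nat.succ_sub_one, Bool.false_eq_true, if_false, add_zero]
    rw [pv_aux t a]
    rfl

-- one data index: A's accumulated temp equals the sum of B's per-row counts
lemma pv_rows (rows : List (List Int)) (init : Int) :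
    rows.foldl (fun temp j =>
      (PySem.List.pyRange 0 (j.length : Int) 1).foldl (fun temp k =>
        if k ≠ 0 ∧ PySem.List.pyGetD j (k-1) 0 * PySem.List.pyGetD j k 0 = 0 ∧
           PySem.List.pyGetD j k 0 + PySem.List.pyGetD j (k-1) 0 ≠ 0
        then temp + 1 else temp) temp) init
    = init + (rows.map (fun row => max 0 (pvRuns row - 1))).sum := by
  induction rows generalizing init with
  | nil => simp
  | cons j rs ih =>
    rw [List.foldl_cons, ih, PySem.List.foldl_ite_add_one, pv_row, ← pvMax_runs]
    simp
    ring

-- ===== VERDICT (by name: the statement is the Claim_ definition above) =====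
theorem exp_edge_spec : Claim_equal_exp_edge := by
  intro X_test data _ _
  show exp_edge X_test data = exp_edge_alt X_test data
  rw [exp_edge, exp_edge_alt]
  rw [PySem.List.foldl_append_singleton_eq_map]
  have hbody : ∀ i : Int,
      (((X_test.lookup (PySem.List.pyGetD data i 0)).getD []).foldl (fun temp j =>
        (PySem.List.pyRange 0 (j.length : Int) 1).foldl (fun temp k =>
          if k ≠ 0 ∧ PySem.List.pyGetD j (k-1) 0 * PySem.List.pyGetD j k 0 = 0 ∧
             PySem.List.pyGetD j k 0 + PySem.List.pyGetD j (k-1) 0 ≠ 0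
          then temp + 1 else temp) temp) 0)
      = (((X_test.lookup (PySem.List.pyGetD data i 0)).getD []).map (fun row => max 0 (pvRuns row - 1))).sum := by
    intro i; rw [pv_rows]; ring
  simp only [hbody]
  rw [show (fun i => (((X_test.lookup (PySem.List.pyGetD data i 0)).getD []).map (fun row => max 0 (pvRuns row - 1))).sum)
      = (fun d => (((X_test.lookup d).getD []).map (fun row => max 0 (pvRuns row - 1))).sum) ∘ (fun i => PySem.List.pyGetD data i 0)
    from rfl]
  rw [← List.map_map, PySem.List.map_pyGetD_pyRange_zero']
  simp
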